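-- pv_equiv track=rewrite | github.com/Cavtheman/skolearbejde | numintro/week2/Q0006.py | generate_from_relation_iteratively
-- ===== SOURCE A (Python) =====
-- def generate_from_relation_iteratively(N: int) -> list:
--     retVal = [None] * N
--     for i in range(N):
--         if (i > 0):
--             retVal[i] = 2 * retVal[i-1] + 1
--         else:
--             retVal[i] = 1
--     return retVal
--     """
--     Generate a list of elements from a given recurrence relation using an iterative approach.
--
--     :param N:    The number of elements to generate.
--
--
--     :return:        The resulting list
--     """
-- ===== SOURCE B (Python) =====
-- def generate_from_relation_iteratively(N: int) -> list:
--     # closed form: a[i] = 2**(i+1) - 1, each element computed from its index alone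
--     return [(1 << (i + 1)) - 1 for i in range(N)]
-- ===== Notes on version B (the rewrite author's own statement) =====
-- stated objective: simpler
-- what changed: Replaces the preallocated list and index-based recurrence a[i]=2*a[i-1]+1 with a closed-form per-index formula (1<<(i+1))-1, removing the inter-element dependency.
import Mathlib
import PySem

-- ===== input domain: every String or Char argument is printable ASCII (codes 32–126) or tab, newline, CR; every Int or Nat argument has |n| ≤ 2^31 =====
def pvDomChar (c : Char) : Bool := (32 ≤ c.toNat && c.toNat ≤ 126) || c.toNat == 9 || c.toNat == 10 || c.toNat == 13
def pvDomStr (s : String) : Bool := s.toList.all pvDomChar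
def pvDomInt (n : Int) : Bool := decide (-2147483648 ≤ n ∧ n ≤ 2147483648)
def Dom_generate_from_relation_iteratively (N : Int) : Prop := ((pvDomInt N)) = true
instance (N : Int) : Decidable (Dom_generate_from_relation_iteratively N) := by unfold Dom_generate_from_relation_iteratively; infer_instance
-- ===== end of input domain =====

-- B replaces A's preallocated-list recurrence a[i] = 2*a[i-1] + 1 with the closed form
-- (1 << (i+1)) - 1 computed independently per index (objective: simpler).


-- ===== PORT A =====
-- retVal = [None] * N : modelled as List.replicate N.toNat 0; the 0 placeholder stands for
-- None and is exact because the loop writes retVal[i] before any read of it (reads touch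
-- only index i-1 < i, already overwritten). retVal[i-1] is in range (1 ≤ i < N), ported
-- with pyGetD; retVal[i] = … is List.set at i.toNat (0 ≤ i < N).
def generate_from_relation_iteratively (N : Int) : List Int :=
  (PySem.List.pyRange 0 N 1).foldl
    (fun retVal i =>
      if i > 0 then
        retVal.set i.toNat (2 * PySem.List.pyGetD retVal (i - 1) 0 + 1)
      else
        retVal.set i.toNat 1)
    (List.replicate N.toNat 0)

-- ===== PORT B =====
-- [(1 << (i + 1)) - 1 for i in range(N)]; 1 << (i+1) is exactly 2^(i+1) since i ≥ 0 in range(N)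
def generate_from_relation_iteratively_alt (N : Int) : List Int :=
  (PySem.List.pyRange 0 N 1).map (fun i => 2 ^ (i + 1).toNat - 1)

-- ===== PRECONDITION & SPEC =====
def Spec_generate_from_relation_iteratively (N : Int) (out : List Int) : Prop := out = generate_from_relation_iteratively_alt N
instance (N : Int) (out : List Int) : Decidable (Spec_generate_from_relation_iteratively N out) := by unfold Spec_generate_from_relation_iteratively; infer_instance

-- ===== CLAIM (what is proved, stated in full; the proofs are below) =====
def Claim_equal_generate_from_relation_iteratively : Prop := ∀ (N : Int), Dom_generate_from_relation_iteratively N → Spec_generate_from_relation_iteratively N (generate_from_relation_iteratively N)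

-- ===== LEMMAS AND PROOFS =====

-- the closed-form value of entry k
def pvF (k : Nat) : Int := 2 ^ (k + 1) - 1

-- loop invariant: after processing range(n) (n ≤ N), the first n slots hold the closed-form
-- values and the remaining N - n slots are still the placeholder
theorem pv_inv (N n : Nat) (h : n ≤ N) :
    (PySem.List.pyRange 0 (n : Int) 1).foldl
      (fun retVal i =>
        if i > 0 then
          retVal.set i.toNat (2 * PySem.List.pyGetD retVal (i - 1) 0 + 1)
        else
          retVal.set i.toNat 1)
      (List.replicate N 0)
    = (List.range n).map pvF ++ List.replicate (N - n) 0 := by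
  induction n with
  | zero => simp [PySem.List.pyRange_one_eq_nil]
  | succ n ih =>
    have hn : n ≤ N := Nat.le_of_succ_le h
    have hsplit : PySem.List.pyRange 0 ((n + 1 : Nat) : Int) 1
        = PySem.List.pyRange 0 (n : Int) 1 ++ [(n : Int)] := by
      push_cast
      exact PySem.List.pyRange_one_succ_right (by positivity)
    rw [hsplit, List.foldl_append, ih hn]
    simp only [List.foldl_cons, List.foldl_nil]
    have hrep : List.replicate (N - n) (0 : Int) = 0 :: List.replicate (N - (n + 1)) 0 := by
      have : N - n = (N - (n + 1)) + 1 := by omega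
      rw [this, List.replicate_succ]
    by_cases hn0 : n = 0
    · subst hn0
      obtain ⟨m, rfl⟩ : ∃ m, N = m + 1 := ⟨N - 1, by omega⟩
      norm_num [List.replicate_succ, pvF]
    · have hpos : (0 : Int) < (n : Int) := by exact_mod_cast Nat.pos_of_ne_zero hn0
      rw [if_pos hpos]
      have hget : PySem.List.pyGetD
          ((List.range n).map pvF ++ List.replicate (N - n) 0) ((n : Int) - 1) 0
          = pvF (n - 1) := by
        have h1 : ((n : Int) - 1) = ((n - 1 : Nat) : Int) := by omega
        rw [h1, PySem.List.pyGetD_natCast]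
        have hlt : n - 1 < ((List.range n).map pvF ++ List.replicate (N - n) 0).length := by
          simp; omega
        rw [List.getD_eq_getElem _ _ hlt, List.getElem_append_left (by simp; omega)]
        simp
      rw [hget]
      have hval : 2 * pvF (n - 1) + 1 = pvF n := by
        unfold pvF
        have : n - 1 + 1 = n := Nat.succ_pred_eq_of_pos (Nat.pos_of_ne_zero hn0)
        rw [this]
        have : (2 : Int) ^ (n + 1) = 2 * 2 ^ n := by ring
        rw [this]; ring
      rw [hval]
      have htoNat : ((n : Int)).toNat = n := Int.toNat_natCast n
      rw [htoNat, hrep]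
      rw [List.set_append_right _ _ (by simp)]
      simp [List.range_succ]

-- ===== VERDICT (by name: the statement is the Claim_ definition above) =====
theorem generate_from_relation_iteratively_spec : Claim_equal_generate_from_relation_iteratively := by
  intro N _
  unfold Spec_generate_from_relation_iteratively generate_from_relation_iteratively
    generate_from_relation_iteratively_alt
  by_cases hN : N ≤ 0
  · have h0 : N.toNat = 0 := Int.toNat_of_nonpos hN
    rw [PySem.List.pyRange_one_eq_nil hN]
    simp [h0]
  · rw [not_le] at hN
    have hNe : N = ((N.toNat : Nat) : Int) := (Int.toNat_of_nonneg (le_of_lt hN)).symm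
    rw [hNe, Int.toNat_natCast]
    rw [pv_inv N.toNat N.toNat (le_refl _)]
    simp only [Nat.sub_self, List.replicate_zero, List.append_nil]
    rw [PySem.List.pyRange_zero_natCast]
    rw [List.map_map]
    apply List.map_congr_left
    intro k _
    simp [pvF, Function.comp]
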